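-- pv_equiv track=rewrite | github.com/kha26/NLP_Project1 | main.py | convertUnkownWords
-- ===== SOURCE A (Python) =====
-- unknownWord = '<unk>';
--
-- def convertUnkownWords(text):
--     data = text.split(' ');
--     unknowns = {};
--     for i in range(0, len(data)):
--         if not(data[i] in unknowns):
--             unknowns[data[i]] = 1;
--             data[i] = unknownWord;
--     return data;
-- ===== SOURCE B (Python) =====
-- unknownWord = '<unk>'
--
-- def convertUnkownWords(text):
--     data = text.split(' ')
--     first = {}
--     for i, w in enumerate(data):
--         first.setdefault(w, i)
--     firsts = set(first.values())
--     return [unknownWord if i in firsts else w for i, w in enumerate(data)]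
-- ===== Notes on version B (the rewrite author's own statement) =====
-- stated objective: alternative
-- what changed: Replaces A's single in-place pass (mutating data[i] while checking a seen-dict) with two passes: first build a first-occurrence index table via setdefault and take the set of its values, then rewrite the list in a comprehension keyed on index membership in that set.
import Mathlib
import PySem

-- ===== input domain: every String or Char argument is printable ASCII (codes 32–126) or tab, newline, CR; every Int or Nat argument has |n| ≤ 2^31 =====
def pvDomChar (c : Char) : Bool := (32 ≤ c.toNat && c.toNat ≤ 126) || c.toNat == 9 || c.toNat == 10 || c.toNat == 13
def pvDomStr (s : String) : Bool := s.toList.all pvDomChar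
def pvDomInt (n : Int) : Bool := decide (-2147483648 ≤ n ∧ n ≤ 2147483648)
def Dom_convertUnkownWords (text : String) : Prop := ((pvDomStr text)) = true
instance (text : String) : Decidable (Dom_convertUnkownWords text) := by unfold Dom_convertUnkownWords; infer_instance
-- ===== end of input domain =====

-- B replaces A's single in-place marking pass with a first-occurrence index table plus a
-- rewriting pass over enumerate (objective: alternative decomposition, same cost).

-- ===== PORT A =====
def unknownWord : String := "<unk>"

-- the body of A's for-loop over range(0, len(data)); state = (the mutated list, the dict)
def convAStep (st : List String × PySem.Dict String Int) (i : Int) :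
    List String × PySem.Dict String Int :=
  match PySem.List.pyGet? st.1 i with
  | some w =>
      if st.2.contains w then st
      else (st.1.set i.toNat unknownWord, st.2.insert w 1)
  | none => st   -- unreachable: every i of the range is in bounds

def convertUnkownWords (text : String) : List String :=
  -- text.split(' '): the separator " " is nonempty, so split? is always `some`; getD only discharges the impossible none
  let data := (PySem.Str.split? text " ").getD []
  ((PySem.List.pyRange 0 (data.length : Int) 1).foldl convAStep (data, PySem.Dict.empty)).1

-- ===== PORT B =====
-- the body of B's setdefault loop over enumerate(data)
def sdStep (d : PySem.Dict String Int) (p : Int × String) : PySem.Dict String Int :=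
  d.setdefault p.2 p.1

def convertUnkownWords_alt (text : String) : List String :=
  let data := (PySem.Str.split? text " ").getD []
  let first := (PySem.List.enumerate data).foldl sdStep PySem.Dict.empty
  let firsts : PySem.Set Int := PySem.Set.ofList first.values
  (PySem.List.enumerate data).map (fun p => if firsts.contains p.1 then unknownWord else p.2)

-- ===== PRECONDITION & SPEC =====
def Spec_convertUnkownWords (text : String) (out : List String) : Prop := out = convertUnkownWords_alt text
instance (text : String) (out : List String) : Decidable (Spec_convertUnkownWords text out) := by unfold Spec_convertUnkownWords; infer_instance

-- ===== CLAIM (what is proved, stated in full; the proofs are below) =====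
def Claim_equal_convertUnkownWords : Prop := ∀ (text : String), Dom_convertUnkownWords text → Spec_convertUnkownWords text (convertUnkownWords text)

-- ===== LEMMAS AND PROOFS =====

-- abstract form of A's loop result: replace w by <unk> at each occurrence not seen before
def markD (u : PySem.Dict String Int) : List String → List String
  | [] => []
  | w :: ws => if u.contains w then w :: markD u ws
               else unknownWord :: markD (u.insert w 1) ws

lemma markD_length (u : PySem.Dict String Int) (l : List String) :
    (markD u l).length = l.length := by
  induction l generalizing u with
  | nil => rfl
  | cons x xs ih => simp only [markD]; split <;> simp [ih]

lemma A_loop (suf : List String) : ∀ (pre : List String) (u : PySem.Dict String Int),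
    ((PySem.List.pyRange (pre.length : Int) ((pre.length : Int) + (suf.length : Int)) 1).foldl
        convAStep (pre ++ suf, u)).1 = pre ++ markD u suf := by
  induction suf with
  | nil =>
    intro pre u
    rw [PySem.List.pyRange_one_eq_nil (by simp)]
    simp [markD]
  | cons w ws ih =>
    intro pre u
    have hlc : (((w :: ws).length : Nat) : Int) = (ws.length : Int) + 1 := by
      simp
    rw [PySem.List.pyRange_one_cons (by omega)]
    have hget : PySem.List.pyGet? (pre ++ w :: ws) (pre.length : Int) = some w := by
      rw [PySem.List.pyGet?_natCast]
      simp
    have hb : (pre.length : Int) + 1 + (ws.length : Int)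
        = (pre.length : Int) + ((w :: ws).length : Int) := by rw [hlc]; ring
    by_cases hc : u.contains w = true
    · have hstep : convAStep (pre ++ w :: ws, u) (pre.length : Int) = ((pre ++ [w]) ++ ws, u) := by
        simp [convAStep, hc]
      rw [List.foldl_cons, hstep]
      have h2 := ih (pre ++ [w]) u
      have hlen : (((pre ++ [w]).length : Nat) : Int) = (pre.length : Int) + 1 := by simp
      rw [hlen, hb] at h2
      rw [h2]
      simp [markD, hc]
    · have hc' : u.contains w = false := by simpa using hc
      have hstep : convAStep (pre ++ w :: ws, u) (pre.length : Int)
          = ((pre ++ [unknownWord]) ++ ws, u.insert w 1) := by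
        simp [convAStep, hc']
      rw [List.foldl_cons, hstep]
      have h2 := ih (pre ++ [unknownWord]) (u.insert w 1)
      have hlen : (((pre ++ [unknownWord]).length : Nat) : Int) = (pre.length : Int) + 1 := by simp
      rw [hlen, hb] at h2
      rw [h2]
      simp [markD, hc']

lemma markD_getElem (l : List String) : ∀ (u : PySem.Dict String Int) (k : Nat)
    (h : k < l.length) (h' : k < (markD u l).length),
    (markD u l)[k]'h' =
      if u.contains l[k] = true ∨ l[k] ∈ l.take k then l[k] else unknownWord := by
  induction l with
  | nil => intro u k h h'; simp at h
  | cons x xs ih =>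
    intro u k h h'
    cases k with
    | zero =>
      simp only [List.take_zero, List.getElem_cons_zero, List.not_mem_nil, or_false, markD]
      by_cases hc : u.contains x = true
      · simp [hc]
      · simp [hc]
    | succ k =>
      have hk : k < xs.length := by simpa using h
      simp only [List.getElem_cons_succ, List.take_succ_cons, List.mem_cons]
      by_cases hc : u.contains x = true
      · simp only [markD, if_pos hc, List.getElem_cons_succ]
        rw [ih u k hk (by rw [markD_length]; exact hk)]
        apply if_congr _ rfl rfl
        constructor
        · tauto
        · rintro (h1 | h2 | h3)
          · exact Or.inl h1
          · exact Or.inl (h2 ▸ hc)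
          · exact Or.inr h3
      · have hc' : u.contains x = false := by simpa using hc
        simp only [markD, hc', if_false, Bool.false_eq_true, List.getElem_cons_succ]
        rw [ih (u.insert x 1) k hk (by rw [markD_length]; exact hk)]
        apply if_congr _ rfl rfl
        rw [PySem.Dict.contains_insert]
        simp only [Bool.or_eq_true, beq_iff_eq]
        constructor
        · rintro ((h1 | h1) | h2)
          · exact Or.inr (Or.inl h1)
          · exact Or.inl h1
          · exact Or.inr (Or.inr h2)
        · rintro (h1 | h2 | h3)
          · exact Or.inl (Or.inr h1)
          · exact Or.inl (Or.inl h2)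
          · exact Or.inr h3

-- first-occurrence index of w in l
def firstIdxN (w : String) : List String → Option Nat
  | [] => none
  | x :: xs => if x = w then some 0 else (firstIdxN w xs).map (· + 1)

lemma sd_get? (ps : List (Int × String)) : ∀ (d : PySem.Dict String Int) (w : String),
    ((ps.foldl sdStep d).get? w) =
      (d.get? w).or ((ps.find? (fun p => p.2 == w)).map (·.1)) := by
  induction ps with
  | nil => intro d w; simp
  | cons p ps ih =>
    intro d w
    rw [List.foldl_cons, ih]
    by_cases hw : p.2 = w
    · rw [List.find?_cons_of_pos (by simp [hw])]
      have : sdStep d p = d.setdefault w p.1 := by rw [sdStep, hw]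
      rw [this, PySem.Dict.get?_setdefault_self]
      cases hdg : d.get? w <;> simp
    · rw [List.find?_cons_of_neg (by simp [hw])]
      have hne : w ≠ p.2 := fun h => hw h.symm
      rw [sdStep, PySem.Dict.get?_setdefault_of_ne d p.1 hne]

lemma sd_nodup_keys (ps : List (Int × String)) : ∀ (d : PySem.Dict String Int),
    d.keys.Nodup → ((ps.foldl sdStep d).keys.Nodup) := by
  induction ps with
  | nil => intro d hd; exact hd
  | cons p ps ih =>
    intro d hd
    rw [List.foldl_cons]
    apply ih
    by_cases hc : d.contains p.2 = true
    · rw [sdStep, PySem.Dict.setdefault_of_contains d p.1 hc]; exact hd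
    · rw [sdStep, PySem.Dict.setdefault_of_not_contains d p.1 (by simpa using hc)]
      exact PySem.Dict.nodup_keys_insert d p.2 p.1 hd

lemma mem_values_iff (d : PySem.Dict String Int) (hnd : d.keys.Nodup) (k : Int) :
    k ∈ d.values ↔ ∃ w, d.get? w = some k := by
  rw [PySem.Dict.values_eq_map_keys d hnd k]
  constructor
  · intro h
    obtain ⟨w, hw, he⟩ := List.mem_map.mp h
    refine ⟨w, ?_⟩
    cases hg : d.get? w with
    | none =>
      exact absurd hw ((PySem.Dict.get?_eq_none_iff_not_mem_keys d w).mp hg)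
    | some v =>
      have hv : d.getD w k = v := by simp [PySem.Dict.getD, hg]
      rw [hv] at he
      simp [he]
  · rintro ⟨w, hg⟩
    apply List.mem_map.mpr
    refine ⟨w, ?_, ?_⟩
    · by_contra hmem
      rw [(PySem.Dict.get?_eq_none_iff_not_mem_keys d w).mpr hmem] at hg
      simp at hg
    · simp [PySem.Dict.getD, hg]

lemma find?_enumerate (l : List String) (w : String) : ∀ (s : Int),
    (((PySem.List.enumerate l s).find? (fun p => p.2 == w)).map (·.1)) =
      (firstIdxN w l).map (fun j => s + (j : Int)) := by
  induction l with
  | nil => intro s; simp [PySem.List.enumerate, firstIdxN]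
  | cons x xs ih =>
    intro s
    rw [PySem.List.enumerate_cons]
    by_cases hx : x = w
    · rw [List.find?_cons_of_pos (by simp [hx])]
      simp [firstIdxN, hx]
    · rw [List.find?_cons_of_neg (by simp [hx])]
      rw [ih (s + 1)]
      simp only [firstIdxN, hx, if_false]
      cases firstIdxN w xs <;> simp
      ring

lemma firstIdxN_eq_some (l : List String) (w : String) : ∀ (k : Nat),
    firstIdxN w l = some k ↔ ∃ _ : k < l.length, l[k] = w ∧ w ∉ l.take k := by
  induction l with
  | nil => intro k; simp [firstIdxN]
  | cons x xs ih =>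
    intro k
    by_cases hx : x = w
    · subst hx
      simp only [firstIdxN, reduceIte]
      constructor
      · intro h
        have hk0 : k = 0 := (Option.some_inj.mp h).symm
        subst hk0
        exact ⟨by simp, by simp, by simp⟩
      · rintro ⟨h, he, hm⟩
        cases k with
        | zero => rfl
        | succ k => exact absurd (by simp) hm
    · simp only [firstIdxN, if_neg hx]
      cases k with
      | zero =>
        rw [Option.map_eq_some_iff]
        constructor
        · rintro ⟨j, _, hj⟩; omega
        · rintro ⟨h, he, hm⟩
          exact absurd (by simpa using he) hx
      | succ k =>
        rw [Option.map_eq_some_iff]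
        constructor
        · rintro ⟨j, hj, hjk⟩
          have hjeq : j = k := by omega
          subst hjeq
          obtain ⟨h, he, hm⟩ := (ih j).mp hj
          refine ⟨by simpa using Nat.succ_lt_succ h, by simpa using he, ?_⟩
          simp only [List.take_succ_cons, List.mem_cons]
          rintro (h1 | h2)
          · exact hx h1.symm
          · exact hm h2
        · rintro ⟨h, he, hm⟩
          refine ⟨k, (ih k).mpr ⟨by simpa using h, by simpa using he, ?_⟩, rfl⟩
          intro hmem
          exact hm (by simp [hmem])

lemma map_cast_eq (o : Option Nat) (k : Nat) :
    (o.map (fun j => (j : Int))) = some (k : Int) ↔ o = some k := by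
  cases o <;> simp

lemma main_eq (data : List String) :
    ((PySem.List.pyRange 0 (data.length : Int) 1).foldl convAStep (data, PySem.Dict.empty)).1
    = (PySem.List.enumerate data).map
        (fun p =>
          if (PySem.Set.ofList
              ((PySem.List.enumerate data).foldl sdStep PySem.Dict.empty).values).contains p.1
          then unknownWord else p.2) := by
  have hA : ((PySem.List.pyRange 0 (data.length : Int) 1).foldl convAStep
      (data, PySem.Dict.empty)).1 = markD PySem.Dict.empty data := by
    have h := A_loop data [] PySem.Dict.empty
    simpa using h
  rw [hA]
  have hlen : (markD PySem.Dict.empty data).length = data.length := markD_length _ _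
  apply List.ext_getElem
  · simp [hlen, PySem.List.length_enumerate]
  · intro k h1 h2
    have hk : k < data.length := by rwa [hlen] at h1
    rw [markD_getElem data PySem.Dict.empty k hk]
    rw [List.getElem_map, PySem.List.getElem_enumerate]
    simp only [zero_add]
    have hcont : ((PySem.Set.ofList
        ((PySem.List.enumerate data).foldl sdStep PySem.Dict.empty).values).contains
          ((k : Nat) : Int)) = true ↔ data[k] ∉ data.take k := by
      rw [PySem.Set.contains_iff, PySem.Set.mem_ofList]
      rw [mem_values_iff _ (sd_nodup_keys _ _ (by simp))]
      constructor
      · rintro ⟨w, hw⟩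
        rw [sd_get? _ _ w, find?_enumerate, PySem.Dict.get?_empty, Option.none_or] at hw
        simp only [zero_add] at hw
        rw [map_cast_eq] at hw
        obtain ⟨_, he, hm⟩ := (firstIdxN_eq_some data w k).mp hw
        rw [he]
        exact hm
      · intro hm
        refine ⟨data[k], ?_⟩
        rw [sd_get? _ _ _, find?_enumerate, PySem.Dict.get?_empty, Option.none_or]
        simp only [zero_add]
        rw [map_cast_eq]
        exact (firstIdxN_eq_some data data[k] k).mpr ⟨hk, rfl, hm⟩
    have hce : (PySem.Dict.empty : PySem.Dict String Int).contains data[k] = false := by simp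
    by_cases hm : data[k] ∈ data.take k
    · have hfalse : ((PySem.Set.ofList
          ((PySem.List.enumerate data).foldl sdStep PySem.Dict.empty).values).contains
            ((k : Nat) : Int)) = false := by
        cases hcb : ((PySem.Set.ofList
            ((PySem.List.enumerate data).foldl sdStep PySem.Dict.empty).values).contains
              ((k : Nat) : Int)) with
        | false => rfl
        | true => exact absurd hm (hcont.mp hcb)
      rw [if_pos (Or.inr hm), hfalse]
      simp
    · rw [if_neg (by simp [hce, hm]), hcont.mpr hm]
      simp

-- ===== VERDICT (by name: the statement is the Claim_ definition above) =====
theorem convertUnkownWords_spec : Claim_equal_convertUnkownWords := by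
  intro text _
  show convertUnkownWords text = convertUnkownWords_alt text
  unfold convertUnkownWords convertUnkownWords_alt
  exact main_eq _
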